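-- pv_equiv track=rewrite | github.com/yilmale/pythonProject | cognitiveMap.py | createPairs
-- ===== SOURCE A (Python) =====
-- def createPairs(nodes,w):
--     if (len(nodes) == 1):
--         pairs = []
--     else:
--         h = nodes.pop(0)
--         remainingNodes = nodes.copy()
--         pairs = createPairs(nodes,w)
--         ps=[]
--         for n in remainingNodes:
--             ps.append((h,n,w))
--         pairs = ps + pairs
--     return pairs
-- ===== SOURCE B (Python) =====
-- def createPairs(nodes, w):
--     if len(nodes) == 1:
--         return []
--     pairs = []
--     h = nodes.pop(0)
--     while True:
--         for n in nodes:
--             pairs.append((h, n, w))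
--         if len(nodes) == 1:
--             break
--         h = nodes.pop(0)
--     return pairs
-- ===== Notes on version B (the rewrite author's own statement) =====
-- stated objective: faster
-- what changed: Replaces the recursion (which rebuilds the result with repeated ps + pairs list concatenations, copying the growing result at every level) by a single iterative while-loop that appends all pairs into one accumulator front-to-back; same pop(0) mutation and empty-input IndexError.
import Mathlib
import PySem

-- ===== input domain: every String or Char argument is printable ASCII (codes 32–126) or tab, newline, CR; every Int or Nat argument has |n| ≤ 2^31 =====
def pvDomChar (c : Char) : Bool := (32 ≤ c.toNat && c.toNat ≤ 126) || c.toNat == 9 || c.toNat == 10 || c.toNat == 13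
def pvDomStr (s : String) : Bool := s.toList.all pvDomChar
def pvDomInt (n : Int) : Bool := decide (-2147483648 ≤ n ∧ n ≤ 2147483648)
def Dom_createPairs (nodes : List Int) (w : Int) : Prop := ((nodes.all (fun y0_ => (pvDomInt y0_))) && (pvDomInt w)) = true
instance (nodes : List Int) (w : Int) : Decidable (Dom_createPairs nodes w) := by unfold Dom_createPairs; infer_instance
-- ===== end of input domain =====

-- B replaces A's recursion (repeated ps + pairs concatenations) by a single iterative loop with one
-- accumulator; return values agree on nonempty inputs. Both A and B mutate `nodes` down to its last
-- element via pop(0) and raise IndexError on the empty list; the equivalence proved is about the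
-- return value only (B performs the same mutation).

-- ===== PORT A =====
-- literal transliteration of A's recursion; the [] case is unreachable under Pre_ (Python pops and raises)
def createPairs (nodes : List Int) (w : Int) : List (Int × Int × Int) :=
  if nodes.length == 1 then []
  else
    match nodes with
    | [] => []          -- Python raises IndexError here (pop from empty list); excluded by Pre_
    | h :: rest =>
      -- h = nodes.pop(0); remainingNodes = nodes.copy(); pairs = createPairs(nodes, w)
      let remainingNodes := rest
      let pairs := createPairs rest w
      -- ps = []; for n in remainingNodes: ps.append((h, n, w))
      let ps := remainingNodes.foldl (fun acc n => acc ++ [(h, n, w)]) []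
      ps ++ pairs

-- ===== PORT B =====
-- the body of B's while-loop: emit (h,n,w) for all n in nodes, then stop or pop the next head
def createPairsLoop (h : Int) (nodes : List Int) (w : Int)
    (pairs : List (Int × Int × Int)) : List (Int × Int × Int) :=
  let pairs := nodes.foldl (fun acc n => acc ++ [(h, n, w)]) pairs
  if nodes.length == 1 then pairs
  else
    match nodes with
    | [] => pairs        -- unreachable from createPairs_alt: nodes stays nonempty inside the loop
    | h' :: rest => createPairsLoop h' rest w pairs

def createPairs_alt (nodes : List Int) (w : Int) : List (Int × Int × Int) :=
  if nodes.length == 1 then []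
  else
    match nodes with
    | [] => []           -- Python raises IndexError here (pop from empty list); excluded by Pre_
    | h :: rest => createPairsLoop h rest w []

-- ===== PRECONDITION & SPEC =====
-- Pre_ excludes only the empty list, on which the Python A raises IndexError (pop from empty list)
def Pre_createPairs (nodes : List Int) (w : Int) : Prop := nodes ≠ []
instance (nodes : List Int) (w : Int) : Decidable (Pre_createPairs nodes w) := by
  unfold Pre_createPairs; infer_instance

def pvWitness_createPairs : List Int × Int := ([3, 1, 2], 9)

def Spec_createPairs (nodes : List Int) (w : Int) (out : List (Int × Int × Int)) : Prop :=
  out = createPairs_alt nodes w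
instance (nodes : List Int) (w : Int) (out : List (Int × Int × Int)) :
    Decidable (Spec_createPairs nodes w out) := by unfold Spec_createPairs; infer_instance

-- ===== CLAIM (what is proved, stated in full; the proofs are below) =====
def Claim_equal_createPairs : Prop := ∀ (nodes : List Int) (w : Int),
  Dom_createPairs nodes w → Pre_createPairs nodes w →
    Spec_createPairs nodes w (createPairs nodes w)

-- ===== LEMMAS AND PROOFS =====

-- A's clean cons recursion: holds for ALL tails (for rest = [] both sides are [])
theorem createPairs_cons (h : Int) (rest : List Int) (w : Int) :
    createPairs (h :: rest) w
      = rest.foldl (fun acc n => acc ++ [(h, n, w)]) [] ++ createPairs rest w := by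
  cases rest with
  | nil => simp [createPairs]
  | cons a t => rw [createPairs]; simp

-- the loop accumulates exactly A's pairs behind its accumulator
theorem createPairsLoop_eq (rest : List Int) (h : Int) (w : Int)
    (acc : List (Int × Int × Int)) :
    createPairsLoop h rest w acc = acc ++ createPairs (h :: rest) w := by
  induction rest generalizing h acc with
  | nil => simp [createPairsLoop, createPairs]
  | cons a t ih =>
    rw [createPairsLoop, createPairs_cons]
    by_cases hl : (a :: t).length == 1
    · simp at hl
      subst hl
      simp [createPairs]
    · simp only [hl, Bool.false_eq_true, if_false]
      rw [ih, createPairs_cons]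
      simp

-- ===== VERDICT (by name: the statement is the Claim_ definition above) =====
theorem createPairs_spec : Claim_equal_createPairs := by
  intro nodes w _ hpre
  unfold Spec_createPairs createPairs_alt
  cases nodes with
  | nil => exact absurd rfl hpre
  | cons h rest =>
    by_cases hl : (h :: rest).length == 1
    · simp at hl
      subst hl
      simp [createPairs]
    · simp only [hl, Bool.false_eq_true, if_false]
      rw [createPairsLoop_eq, createPairs_cons]
      simp
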